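-- pv_equiv track=rewrite | github.com/Astery0502/my-agent-harness | runtime/skills/nexus/template/.nexus/scripts/graph_helpers.py | resolve_route_ref_for_file
-- ===== SOURCE A (Python) =====
-- from typing import Any
--
-- def normalize_graph_node_id(target: str) -> str:
--     target = target.strip()
--     while target.startswith('./'):
--         target = target[2:]
--     return target
--
-- def resolve_route_ref_for_file(file_path: str, route_index: dict[str, Any]) -> str | None:
--     file_path = normalize_graph_node_id(file_path)
--     path_map = route_index.get('path_to_route_id', {})
--     best = None
--     for route_path, route_id in path_map.items():
--         rp = route_path.rstrip('/')
--         if rp in ('', '.'):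
--             if best is None:
--                 best = (0, route_id)
--             continue
--         if file_path == rp or file_path.startswith(rp + '/'):
--             score = len(rp)
--             if best is None or score > best[0]:
--                 best = (score, route_id)
--     return best[1] if best else None
-- ===== SOURCE B (Python) =====
-- def resolve_route_ref_for_file(file_path, route_index):
--     file_path = file_path.strip()
--     while file_path.startswith('./'):
--         file_path = file_path[2:]
--     index = {}
--     fallback = None
--     for route_path, route_id in route_index.get('path_to_route_id', {}).items():
--         rp = route_path.rstrip('/')
--         if rp in ('', '.'):
--             if fallback is None:
--                 fallback = route_id
--         elif rp not in index:
--             index[rp] = route_id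
--     prefixes = [file_path[:i] for i, ch in enumerate(file_path) if ch == '/']
--     for cand in [file_path] + prefixes[::-1]:
--         if cand in index:
--             return index[cand]
--     return fallback
-- ===== Notes on version B (the rewrite author's own statement) =====
-- stated objective: alternative
-- what changed: Replaces A's scan over all route entries maximizing prefix-match length by a prebuilt keep-first hash index of rstripped route paths (recording the first ''/'.' entry as fallback) probed with the path's ancestor prefixes from longest to shortest.
import Mathlib
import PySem

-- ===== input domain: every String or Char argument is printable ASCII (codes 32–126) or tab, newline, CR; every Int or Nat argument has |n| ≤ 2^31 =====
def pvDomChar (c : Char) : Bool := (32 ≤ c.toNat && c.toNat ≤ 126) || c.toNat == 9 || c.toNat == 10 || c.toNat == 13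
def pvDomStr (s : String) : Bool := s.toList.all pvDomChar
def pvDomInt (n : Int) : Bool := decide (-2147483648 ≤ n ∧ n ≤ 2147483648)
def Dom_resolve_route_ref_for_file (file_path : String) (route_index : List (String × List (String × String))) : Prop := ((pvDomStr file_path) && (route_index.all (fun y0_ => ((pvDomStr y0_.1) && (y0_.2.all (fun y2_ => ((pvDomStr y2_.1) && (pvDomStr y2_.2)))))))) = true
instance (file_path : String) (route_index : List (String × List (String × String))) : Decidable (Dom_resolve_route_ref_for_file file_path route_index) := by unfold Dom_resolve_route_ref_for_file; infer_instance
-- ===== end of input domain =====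

-- B replaces A's scan-and-maximize over all route entries by a prebuilt keep-first index of
-- rstripped route paths plus a longest-to-shortest ancestor-prefix lookup (objective: alternative).


-- ===== PORT A =====
-- "while target.startswith('./'): target = target[2:]" — exact: each iteration removes one leading "./"
def pvDropDotSlash : List Char → List Char
  | '.' :: '/' :: rest => pvDropDotSlash rest
  | l => l

def normalize_graph_node_id (target : String) : String :=
  String.ofList (pvDropDotSlash (PySem.Chars.strip target.toList))

-- route_path.rstrip('/') — exact: removes exactly the trailing '/' characters
def pvRstripSlash (l : List Char) : List Char :=
  (l.reverse.dropWhile (fun c => c = '/')).reverse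

def resolve_route_ref_for_file (file_path : String) (route_index : List (String × List (String × String))) : Option String :=
  let fp := (normalize_graph_node_id file_path).toList
  let path_map := (PySem.Dict.mk route_index).getD "path_to_route_id" []
  let best := path_map.foldl (fun (best : Option (Int × String)) pr =>
    let rp := pvRstripSlash pr.1.toList
    if rp = [] ∨ rp = ['.'] then
      match best with
      | none => some (0, pr.2)
      | some b => some b
    else if fp = rp ∨ PySem.Chars.startswith fp (rp ++ ['/']) = true then
      let score := PySem.Chars.len rp
      match best with
      | none => some (score, pr.2)
      | some b => if b.1 < score then some (score, pr.2) else some b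
    else best) none
  match best with
  | some b => some b.2
  | none => none

-- ===== PORT B =====
def resolve_route_ref_for_file_alt (file_path : String) (route_index : List (String × List (String × String))) : Option String :=
  let fp := pvDropDotSlash (PySem.Chars.strip file_path.toList)
  let path_map := (PySem.Dict.mk route_index).getD "path_to_route_id" []
  let st := path_map.foldl (fun (st : PySem.Dict (List Char) String × Option String) pr =>
    let rp := pvRstripSlash pr.1.toList
    if rp = [] ∨ rp = ['.'] then
      (st.1, match st.2 with | none => some pr.2 | some f => some f)
    else if st.1.contains rp then st
    else (st.1.insert rp pr.2, st.2)) (PySem.Dict.empty, none)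
  -- "[file_path[:i] for i, ch in enumerate(file_path) if ch == '/']"; file_path[:i] with 0 ≤ i < len is take i
  let prefixes := (PySem.List.enumerate fp).filterMap
    (fun p => if p.2 = '/' then some (fp.take p.1.toNat) else none)
  let cands := fp :: prefixes.reverse
  match cands.find? (fun c => st.1.contains c) with
  | some c => st.1.get? c
  | none => st.2

-- ===== PRECONDITION & SPEC =====
def Spec_resolve_route_ref_for_file (file_path : String) (route_index : List (String × List (String × String))) (out : Option String) : Prop := out = resolve_route_ref_for_file_alt file_path route_index
instance (file_path : String) (route_index : List (String × List (String × String))) (out : Option String) : Decidable (Spec_resolve_route_ref_for_file file_path route_index out) := by unfold Spec_resolve_route_ref_for_file; infer_instance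

-- ===== CLAIM (what is proved, stated in full; the proofs are below) =====
def Claim_equal_resolve_route_ref_for_file : Prop := ∀ (file_path : String) (route_index : List (String × List (String × String))), Dom_resolve_route_ref_for_file file_path route_index → Spec_resolve_route_ref_for_file file_path route_index (resolve_route_ref_for_file file_path route_index)

-- ===== LEMMAS AND PROOFS =====

-- rstripped route path of an entry
def pvRp (pr : String × String) : List Char := pvRstripSlash pr.1.toList

-- fallback entry ('' or '.')
def pvIsFb (pr : String × String) : Bool := decide (pvRp pr = [] ∨ pvRp pr = ['.'])

-- positively matching entry for normalized path fp
def pvIsM (fp : List Char) (pr : String × String) : Bool :=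
  !pvIsFb pr && decide (fp = pvRp pr ∨ PySem.Chars.startswith fp (pvRp pr ++ ['/']) = true)

-- A's loop body
def pvStepA (fp : List Char) (best : Option (Int × String)) (pr : String × String) : Option (Int × String) :=
  let rp := pvRstripSlash pr.1.toList
  if rp = [] ∨ rp = ['.'] then
    match best with
    | none => some (0, pr.2)
    | some b => some b
  else if fp = rp ∨ PySem.Chars.startswith fp (rp ++ ['/']) = true then
    let score := PySem.Chars.len rp
    match best with
    | none => some (score, pr.2)
    | some b => if b.1 < score then some (score, pr.2) else some b
  else best

-- B's loop body
def pvStepB (st : PySem.Dict (List Char) String × Option String) (pr : String × String) :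
    PySem.Dict (List Char) String × Option String :=
  let rp := pvRstripSlash pr.1.toList
  if rp = [] ∨ rp = ['.'] then
    (st.1, match st.2 with | none => some pr.2 | some f => some f)
  else if st.1.contains rp then st
  else (st.1.insert rp pr.2, st.2)

-- maximal score among matching entries
def pvAmax (fp : List Char) (pm : List (String × String)) : Option Int :=
  ((pm.filter (pvIsM fp)).map (fun pr => PySem.Chars.len (pvRp pr))).max?

-- B's candidate list
def pvCands (fp : List Char) : List (List Char) :=
  fp :: ((PySem.List.enumerate fp).filterMap
    (fun p => if p.2 = '/' then some (fp.take p.1.toNat) else none)).reverse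


theorem pvZipIdx_pairwise {α : Type} : ∀ (l : List α) (k : Nat),
    List.Pairwise (fun p q : α × Nat => p.2 < q.2) (l.zipIdx k) := by
  intro l
  induction l with
  | nil => intro k; simp
  | cons x xs ih =>
    intro k
    rw [List.zipIdx_cons]
    refine List.pairwise_cons.mpr ⟨?_, ih (k + 1)⟩
    intro q hq
    have := List.mem_zipIdx (x := q.1) (i := q.2) (by simpa using hq)
    omega

theorem pvMatch_take (fp rp : List Char) (h : fp = rp ∨ PySem.Chars.startswith fp (rp ++ ['/']) = true) :
    rp = fp.take rp.length ∧ rp.length ≤ fp.length := by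
  rcases h with h | h
  · subst h; simp
  · rw [PySem.Chars.startswith_iff] at h
    have h1 : rp <+: fp := List.IsPrefix.trans ⟨['/'], rfl⟩ h
    have h2 := h.length_le
    simp only [List.length_append, List.length_cons, List.length_nil] at h2
    exact ⟨List.prefix_iff_eq_take.mp h1, by omega⟩

theorem pvMem_cands (fp rp : List Char) (_hne : ¬ (rp = [] ∨ rp = ['.'])) :
    rp ∈ pvCands fp ↔ (fp = rp ∨ PySem.Chars.startswith fp (rp ++ ['/']) = true) := by
  unfold pvCands
  rw [List.mem_cons, List.mem_reverse, List.mem_filterMap]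
  constructor
  · rintro (rfl | ⟨p, hp, hsome⟩)
    · exact Or.inl rfl
    · right
      rw [PySem.List.enumerate_eq_zipIdx_map] at hp
      obtain ⟨q, hq, rfl⟩ := List.mem_map.mp hp
      have hq' : fp[q.2]? = some q.1 := List.mem_zipIdx_iff_getElem?.mp hq
      by_cases hch : q.1 = '/'
      · rw [if_pos hch] at hsome
        have hrp : rp = fp.take q.2 := by
          have : ((0 : Int) + (q.2 : Int)).toNat = q.2 := by omega
          rw [this] at hsome
          exact (Option.some_inj.mp hsome).symm
        have hlt : q.2 < fp.length := by
          rcases List.getElem?_eq_some_iff.mp hq' with ⟨h, _⟩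
          exact h
        rw [PySem.Chars.startswith_iff]
        refine ⟨fp.drop (q.2 + 1), ?_⟩
        have hgc : fp[q.2] = '/' := by
          rcases List.getElem?_eq_some_iff.mp hq' with ⟨_, hh⟩
          rw [hh, hch]
        calc (rp ++ ['/']) ++ fp.drop (q.2 + 1)
            = rp ++ ('/' :: fp.drop (q.2 + 1)) := by simp
          _ = fp.take q.2 ++ (fp[q.2] :: fp.drop (q.2 + 1)) := by rw [hrp, hgc]
          _ = fp.take q.2 ++ fp.drop q.2 := by rw [← List.drop_eq_getElem_cons hlt]
          _ = fp := List.take_append_drop _ _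
      · rw [if_neg hch] at hsome
        cases hsome
  · rintro (h | h)
    · exact Or.inl h.symm
    · right
      rw [PySem.Chars.startswith_iff] at h
      obtain ⟨t, ht⟩ := h
      have hpre : rp <+: fp := List.IsPrefix.trans ⟨['/'], rfl⟩ ⟨t, ht⟩
      have hrp : rp = fp.take rp.length := List.prefix_iff_eq_take.mp hpre
      have hget : fp[rp.length]? = some '/' := by
        rw [← ht]
        rw [List.append_assoc]
        rw [List.getElem?_append_right (le_refl rp.length)]
        simp
      refine ⟨((0 : Int) + (rp.length : Int), '/'), ?_, ?_⟩
      · rw [PySem.List.enumerate_eq_zipIdx_map]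
        exact List.mem_map.mpr ⟨('/', rp.length), List.mem_zipIdx_iff_getElem?.mpr hget, rfl⟩
      · have : ((0 : Int) + (rp.length : Int)).toNat = rp.length := by omega
        rw [if_pos rfl, this, ← hrp]

theorem pvZipIdx_lt_length {α : Type} (l : List α) (q : α × Nat) (hq : q ∈ l.zipIdx) :
    q.2 < l.length := by
  have := List.mem_zipIdx (x := q.1) (i := q.2) (by simpa using hq)
  omega

theorem pvCands_sorted (fp : List Char) :
    List.Pairwise (fun a b : List Char => b.length < a.length) (pvCands fp) := by
  unfold pvCands
  refine List.pairwise_cons.mpr ⟨?_, ?_⟩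
  · intro c hc
    rw [List.mem_reverse, List.mem_filterMap] at hc
    obtain ⟨p, hp, hsome⟩ := hc
    rw [PySem.List.enumerate_eq_zipIdx_map] at hp
    obtain ⟨q, hq, rfl⟩ := List.mem_map.mp hp
    have hlt : q.2 < fp.length := pvZipIdx_lt_length fp q hq
    by_cases hch : q.1 = '/'
    · rw [if_pos hch] at hsome
      have : ((0 : Int) + (q.2 : Int)).toNat = q.2 := by omega
      rw [this] at hsome
      rw [← Option.some_inj.mp hsome]
      simp [List.length_take]
      omega
    · rw [if_neg hch] at hsome
      cases hsome
  · rw [List.pairwise_reverse, List.pairwise_filterMap, PySem.List.enumerate_eq_zipIdx_map,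
      List.pairwise_map]
    have hzp := pvZipIdx_pairwise fp 0
    refine List.Pairwise.imp_of_mem ?_ hzp
    intro q q' hq hq' hlt b hb b' hb'
    have hql : q.2 < fp.length := pvZipIdx_lt_length fp q hq
    have hq'l : q'.2 < fp.length := pvZipIdx_lt_length fp q' hq'
    by_cases hch : q.1 = '/'
    · rw [if_pos hch] at hb
      by_cases hch' : q'.1 = '/'
      · rw [if_pos hch'] at hb'
        have e1 : ((0 : Int) + (q.2 : Int)).toNat = q.2 := by omega
        have e2 : ((0 : Int) + (q'.2 : Int)).toNat = q'.2 := by omega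
        rw [e1] at hb; rw [e2] at hb'
        rw [← Option.some_inj.mp hb, ← Option.some_inj.mp hb']
        simp [List.length_take]
        omega
      · rw [if_neg hch'] at hb'; cases hb'
    · rw [if_neg hch] at hb; cases hb

theorem pvFind_decreasing (P : List Char → Bool) : ∀ (l : List (List Char)) (c : List Char),
    List.Pairwise (fun a b : List Char => b.length < a.length) l →
    c ∈ l → P c = true → (∀ c' ∈ l, P c' = true → c'.length ≤ c.length) →
    l.find? P = some c := by
  intro l
  induction l with
  | nil => intro c _ hc; cases hc
  | cons h t ih =>
    intro c hp hc hP hbd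
    rcases List.mem_cons.mp hc with rfl | hct
    · exact List.find?_cons_of_pos hP
    · have hlt : c.length < h.length := (List.pairwise_cons.mp hp).1 c hct
      have hPh : P h = false := by
        cases hPh' : P h with
        | false => rfl
        | true =>
          have := hbd h List.mem_cons_self hPh'
          omega
      rw [List.find?_cons_of_neg (by simp [hPh])]
      exact ih c (List.pairwise_cons.mp hp).2 hct hP (fun c' hc' hPc' => hbd c' (List.mem_cons_of_mem _ hc') hPc')

theorem pvFind_congr {α : Type} (p q : α → Bool) : ∀ (l : List α), (∀ x ∈ l, p x = q x) →
    l.find? p = l.find? q := by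
  intro l
  induction l with
  | nil => intro _; rfl
  | cons x xs ih =>
    intro h
    simp only [List.find?_cons, h x (by simp)]
    cases q x <;> simp [ih (fun y hy => h y (by simp [hy]))]

theorem pvLen_eq (l : List Char) : PySem.Chars.len l = (l.length : Int) := rfl

theorem pvIsM_of (fp c : List Char) (pr : String × String) (hrp : pvRp pr = c)
    (hck : ¬ (c = [] ∨ c = ['.'])) (hmatch : fp = c ∨ PySem.Chars.startswith fp (c ++ ['/']) = true) :
    pvIsM fp pr = true := by
  rw [← hrp] at hck hmatch
  simp only [pvIsM, pvIsFb, Bool.and_eq_true, Bool.not_eq_true']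
  exact ⟨decide_eq_false hck, decide_eq_true hmatch⟩

theorem pvA_some (fp : List Char) : ∀ (pm : List (String × String)) (b : Int × String),
    List.foldl (pvStepA fp) (some b) pm =
      (pvAmax fp pm).elim (some b) (fun m => if b.1 < m then
          (pm.find? (fun pr => pvIsM fp pr && (PySem.Chars.len (pvRp pr) == m))).map (fun pr => (m, pr.2))
        else some b) := by
  intro pm
  induction pm with
  | nil => intro b; simp [pvAmax]
  | cons pr pm ih =>
    intro b
    rw [List.foldl_cons]
    by_cases h1 : pvRstripSlash pr.1.toList = [] ∨ pvRstripSlash pr.1.toList = ['.']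
    · have hfb : pvIsFb pr = true := by simp [pvIsFb, pvRp, h1]
      have hM : pvIsM fp pr = false := by simp [pvIsM, hfb]
      have hstep : pvStepA fp (some b) pr = some b := by simp [pvStepA, if_pos h1]
      have hmax : pvAmax fp (pr :: pm) = pvAmax fp pm := by
        simp [pvAmax, hM]
      have hskip : ∀ mm : Int,
          List.find? (fun pr2 => pvIsM fp pr2 && (PySem.Chars.len (pvRp pr2) == mm)) (pr :: pm) =
          List.find? (fun pr2 => pvIsM fp pr2 && (PySem.Chars.len (pvRp pr2) == mm)) pm :=
        fun mm => List.find?_cons_of_neg (by simp [hM])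
      rw [hstep, ih b, hmax]
      simp only [hskip]
    · by_cases h2 : fp = pvRstripSlash pr.1.toList ∨ PySem.Chars.startswith fp (pvRstripSlash pr.1.toList ++ ['/']) = true
      · have hfb : pvIsFb pr = false := by
          simp only [pvIsFb, pvRp, decide_eq_false_iff_not]; exact h1
        have hM : pvIsM fp pr = true := by
          simp only [pvIsM, hfb, Bool.not_false, Bool.true_and, pvRp]
          exact decide_eq_true h2
        have hstep : pvStepA fp (some b) pr =
            if b.1 < PySem.Chars.len (pvRstripSlash pr.1.toList) then
              some (PySem.Chars.len (pvRstripSlash pr.1.toList), pr.2)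
            else some b := by
          simp only [pvStepA, if_neg h1, if_pos h2]
        have hmaxc : pvAmax fp (pr :: pm) =
            some ((pvAmax fp pm).elim (PySem.Chars.len (pvRp pr)) (max (PySem.Chars.len (pvRp pr)))) := by
          simp [pvAmax, hM, List.max?_cons]
        set s := PySem.Chars.len (pvRstripSlash pr.1.toList) with hs
        have hsrp : PySem.Chars.len (pvRp pr) = s := rfl
        rw [hstep, hmaxc, hsrp]
        by_cases hbs : b.1 < s
        · simp only [if_pos hbs]
          rw [ih (s, pr.2)]
          rcases hT : pvAmax fp pm with _ | t
          · simp only [Option.elim_none, Option.elim_some, if_pos hbs]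
            rw [List.find?_cons_of_pos (by rw [hM, hsrp]; simp)]
            try rfl
          · simp only [Option.elim_some]
            by_cases hst : s < t
            · have hmt : max s t = t := max_eq_right (le_of_lt hst)
              have hskip : List.find? (fun pr2 => pvIsM fp pr2 && (PySem.Chars.len (pvRp pr2) == t)) (pr :: pm) =
                  List.find? (fun pr2 => pvIsM fp pr2 && (PySem.Chars.len (pvRp pr2) == t)) pm :=
                List.find?_cons_of_neg (by rw [hsrp, beq_eq_false_iff_ne.mpr (by omega : s ≠ t)]; simp)
              rw [hmt]
              simp only [if_pos hst, if_pos (show b.1 < t by omega), hskip]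
            · have hmt : max s t = s := max_eq_left (by omega)
              rw [hmt]
              simp only [if_neg hst, if_pos hbs]
              rw [List.find?_cons_of_pos (by rw [hM, hsrp]; simp)]
              try rfl
        · simp only [if_neg hbs]
          rw [ih b]
          rcases hT : pvAmax fp pm with _ | t
          · simp only [Option.elim_none, Option.elim_some, if_neg hbs]
          · simp only [Option.elim_some]
            by_cases hst : s < t
            · have hmt : max s t = t := max_eq_right (le_of_lt hst)
              have hskip : List.find? (fun pr2 => pvIsM fp pr2 && (PySem.Chars.len (pvRp pr2) == t)) (pr :: pm) =
                  List.find? (fun pr2 => pvIsM fp pr2 && (PySem.Chars.len (pvRp pr2) == t)) pm :=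
                List.find?_cons_of_neg (by rw [hsrp, beq_eq_false_iff_ne.mpr (by omega : s ≠ t)]; simp)
              rw [hmt]
              by_cases hbt : b.1 < t
              · simp only [if_pos hbt, hskip]
              · simp only [if_neg hbt]
            · have hmt : max s t = s := max_eq_left (by omega)
              rw [hmt]
              simp only [if_neg hbs, if_neg (show ¬ b.1 < t by omega)]
      · have hM : pvIsM fp pr = false := by
          simp only [pvIsM, pvRp, Bool.and_eq_false_iff]
          right
          exact decide_eq_false h2
        have hstep : pvStepA fp (some b) pr = some b := by
          simp only [pvStepA, if_neg h1, if_neg h2]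
        have hmax : pvAmax fp (pr :: pm) = pvAmax fp pm := by
          simp [pvAmax, hM]
        have hskip : ∀ mm : Int,
            List.find? (fun pr2 => pvIsM fp pr2 && (PySem.Chars.len (pvRp pr2) == mm)) (pr :: pm) =
            List.find? (fun pr2 => pvIsM fp pr2 && (PySem.Chars.len (pvRp pr2) == mm)) pm :=
          fun mm => List.find?_cons_of_neg (by simp [hM])
        rw [hstep, ih b, hmax]
        simp only [hskip]

theorem pvAmax_pos (fp : List Char) (pm : List (String × String)) (m : Int)
    (hT : pvAmax fp pm = some m) : 1 ≤ m := by
  have hmem := List.max?_mem hT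
  obtain ⟨pr, hprf, hprm⟩ := List.mem_map.mp hmem
  have hpr := List.mem_filter.mp hprf
  have hM := hpr.2
  have hne : pvRp pr ≠ [] := by
    intro hcontra
    simp [pvIsM, pvIsFb, hcontra] at hM
  have hlen : 1 ≤ (pvRp pr).length := by
    cases hrp : pvRp pr with
    | nil => exact absurd hrp hne
    | cons a l => simp
  rw [← hprm, pvLen_eq]
  omega

theorem pvA_none (fp : List Char) (pm : List (String × String)) :
    List.foldl (pvStepA fp) none pm =
      (pvAmax fp pm).elim ((pm.find? pvIsFb).map (fun pr => ((0 : Int), pr.2)))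
        (fun m => (pm.find? (fun pr => pvIsM fp pr && (PySem.Chars.len (pvRp pr) == m))).map (fun pr => (m, pr.2))) := by
  induction pm with
  | nil => simp [pvAmax]
  | cons pr pm ih =>
    rw [List.foldl_cons]
    by_cases h1 : pvRstripSlash pr.1.toList = [] ∨ pvRstripSlash pr.1.toList = ['.']
    · have hfb : pvIsFb pr = true := by simp [pvIsFb, pvRp, h1]
      have hM : pvIsM fp pr = false := by simp [pvIsM, hfb]
      have hstep : pvStepA fp none pr = some (0, pr.2) := by simp [pvStepA, if_pos h1]
      have hmax : pvAmax fp (pr :: pm) = pvAmax fp pm := by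
        simp [pvAmax, hM]
      rw [hstep, pvA_some fp pm (0, pr.2), hmax]
      rcases hT : pvAmax fp pm with _ | m
      · simp only [Option.elim_none]
        rw [List.find?_cons_of_pos hfb]
        rfl
      · have h0m := pvAmax_pos fp pm m hT
        simp only [Option.elim_some]
        rw [if_pos (show ((0 : Int), pr.2).1 < m by show (0 : Int) < m; omega)]
        rw [List.find?_cons_of_neg (by simp [hM])]
    · by_cases h2 : fp = pvRstripSlash pr.1.toList ∨ PySem.Chars.startswith fp (pvRstripSlash pr.1.toList ++ ['/']) = true
      · have hfb : pvIsFb pr = false := by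
          simp only [pvIsFb, pvRp, decide_eq_false_iff_not]; exact h1
        have hM : pvIsM fp pr = true := by
          simp only [pvIsM, hfb, Bool.not_false, Bool.true_and, pvRp]
          exact decide_eq_true h2
        have hstep : pvStepA fp none pr = some (PySem.Chars.len (pvRstripSlash pr.1.toList), pr.2) := by
          simp [pvStepA, if_neg h1, if_pos h2]
        have hmaxc : pvAmax fp (pr :: pm) =
            some ((pvAmax fp pm).elim (PySem.Chars.len (pvRp pr)) (max (PySem.Chars.len (pvRp pr)))) := by
          simp [pvAmax, hM, List.max?_cons]
        set s := PySem.Chars.len (pvRstripSlash pr.1.toList) with hs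
        have hsrp : PySem.Chars.len (pvRp pr) = s := rfl
        rw [hstep, pvA_some fp pm (s, pr.2), hmaxc, hsrp]
        rcases hT : pvAmax fp pm with _ | t
        · simp only [Option.elim_none, Option.elim_some]
          rw [List.find?_cons_of_pos (by rw [hM, hsrp]; simp)]
          rfl
        · simp only [Option.elim_some]
          by_cases hst : s < t
          · have hmt : max s t = t := max_eq_right (le_of_lt hst)
            rw [hmt]
            rw [if_pos (show ((s, pr.2) : Int × String).1 < t by exact hst)]
            rw [List.find?_cons_of_neg (by rw [hsrp, beq_eq_false_iff_ne.mpr (by omega : s ≠ t)]; simp)]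
          · have hmt : max s t = s := max_eq_left (by omega)
            rw [hmt]
            rw [if_neg (show ¬ ((s, pr.2) : Int × String).1 < t by exact (by omega : ¬ s < t))]
            rw [List.find?_cons_of_pos (by rw [hM, hsrp]; simp)]
            rfl
      · have hfb : pvIsFb pr = false := by
          simp only [pvIsFb, pvRp, decide_eq_false_iff_not]; exact h1
        have hM : pvIsM fp pr = false := by
          simp only [pvIsM, pvRp, Bool.and_eq_false_iff]
          right
          exact decide_eq_false h2
        have hstep : pvStepA fp none pr = none := by
          simp only [pvStepA, if_neg h1, if_neg h2]
        have hmax : pvAmax fp (pr :: pm) = pvAmax fp pm := by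
          simp [pvAmax, hM]
        have hskip : ∀ mm : Int,
            List.find? (fun pr2 => pvIsM fp pr2 && (PySem.Chars.len (pvRp pr2) == mm)) (pr :: pm) =
            List.find? (fun pr2 => pvIsM fp pr2 && (PySem.Chars.len (pvRp pr2) == mm)) pm :=
          fun mm => List.find?_cons_of_neg (by simp [hM])
        rw [hstep, ih, hmax, List.find?_cons_of_neg (by simp [hfb])]
        simp only [hskip]

theorem pvB_snd : ∀ (pm : List (String × String)) (d : PySem.Dict (List Char) String) (fb : Option String),
    (List.foldl pvStepB (d, fb) pm).2 = fb.or ((pm.find? pvIsFb).map (fun pr => pr.2)) := by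
  intro pm
  induction pm with
  | nil => intro d fb; simp
  | cons pr pm ih =>
    intro d fb
    rw [List.foldl_cons]
    by_cases h1 : pvRstripSlash pr.1.toList = [] ∨ pvRstripSlash pr.1.toList = ['.']
    · have hfb : pvIsFb pr = true := by simp [pvIsFb, pvRp, h1]
      rw [List.find?_cons_of_pos hfb]
      have hstep : pvStepB (d, fb) pr = (d, fb.or (some pr.2)) := by
        simp only [pvStepB, if_pos h1]
        cases fb <;> rfl
      rw [hstep, ih]
      cases fb <;> simp
    · have hfb : pvIsFb pr = false := by
        simp only [pvIsFb, pvRp, decide_eq_false_iff_not]; exact h1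
      rw [List.find?_cons_of_neg (by simp [hfb])]
      by_cases hc : d.contains (pvRstripSlash pr.1.toList) = true
      · have hstep : pvStepB (d, fb) pr = (d, fb) := by
          simp [pvStepB, if_neg h1, hc]
        rw [hstep, ih]
      · have hstep : pvStepB (d, fb) pr = (d.insert (pvRstripSlash pr.1.toList) pr.2, fb) := by
          simp [pvStepB, if_neg h1, hc]
        rw [hstep, ih]

theorem pvB_get : ∀ (pm : List (String × String)) (d : PySem.Dict (List Char) String) (fb : Option String)
    (k : List Char), ¬ (k = [] ∨ k = ['.']) →
    (List.foldl pvStepB (d, fb) pm).1.get? k =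
      (d.get? k).or ((pm.find? (fun pr => pvRp pr == k)).map (fun pr => pr.2)) := by
  intro pm
  induction pm with
  | nil => intro d fb k hk; simp
  | cons pr pm ih =>
    intro d fb k hk
    rw [List.foldl_cons]
    by_cases h1 : pvRstripSlash pr.1.toList = [] ∨ pvRstripSlash pr.1.toList = ['.']
    · have hne : (pvRp pr == k) = false := by
        rw [beq_eq_false_iff_ne]
        intro hcontra
        rw [pvRp] at hcontra
        rw [hcontra] at h1
        exact hk h1
      rw [List.find?_cons_of_neg (by simp [hne])]
      have hstep : pvStepB (d, fb) pr = (d, fb.or (some pr.2)) := by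
        simp only [pvStepB, if_pos h1]
        cases fb <;> rfl
      rw [hstep, ih _ _ k hk]
    · by_cases hc : d.contains (pvRstripSlash pr.1.toList) = true
      · have hstep : pvStepB (d, fb) pr = (d, fb) := by
          simp [pvStepB, if_neg h1, hc]
        rw [hstep, ih _ _ k hk]
        by_cases he : pvRp pr = k
        · rw [List.find?_cons_of_pos (by simp [he])]
          have hcK : d.contains k = true := by rw [← he]; exact hc
          rw [PySem.Dict.contains_eq_isSome_get?] at hcK
          obtain ⟨v, hv⟩ := Option.isSome_iff_exists.mp hcK
          rw [hv]
          rfl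
        · rw [List.find?_cons_of_neg (by simp [beq_eq_false_iff_ne.mpr he])]
      · have hstep : pvStepB (d, fb) pr = (d.insert (pvRstripSlash pr.1.toList) pr.2, fb) := by
          simp [pvStepB, if_neg h1, hc]
        rw [hstep, ih _ _ k hk]
        rw [PySem.Dict.get?_insert]
        by_cases he : pvRp pr = k
        · rw [List.find?_cons_of_pos (by simp [he])]
          rw [if_pos (by rw [← he]; rfl)]
          have hdk : d.get? k = none := by
            rw [PySem.Dict.get?_eq_none_iff_contains]
            rw [← he]
            exact Bool.eq_false_iff.mpr hc
          rw [hdk]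
          rfl
        · rw [List.find?_cons_of_neg (by simp [beq_eq_false_iff_ne.mpr he])]
          rw [if_neg (by intro hcontra; exact he (by rw [pvRp, ← hcontra]))]

theorem pvB_get_fb : ∀ (pm : List (String × String)) (d : PySem.Dict (List Char) String) (fb : Option String)
    (k : List Char), (k = [] ∨ k = ['.']) →
    (List.foldl pvStepB (d, fb) pm).1.get? k = d.get? k := by
  intro pm
  induction pm with
  | nil => intro d fb k _; rfl
  | cons pr pm ih =>
    intro d fb k hk
    rw [List.foldl_cons]
    by_cases h1 : pvRstripSlash pr.1.toList = [] ∨ pvRstripSlash pr.1.toList = ['.']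
    · have hstep : pvStepB (d, fb) pr = (d, fb.or (some pr.2)) := by
        simp only [pvStepB, if_pos h1]
        cases fb <;> rfl
      rw [hstep, ih _ _ k hk]
    · by_cases hc : d.contains (pvRstripSlash pr.1.toList) = true
      · have hstep : pvStepB (d, fb) pr = (d, fb) := by
          simp [pvStepB, if_neg h1, hc]
        rw [hstep, ih _ _ k hk]
      · have hstep : pvStepB (d, fb) pr = (d.insert (pvRstripSlash pr.1.toList) pr.2, fb) := by
          simp [pvStepB, if_neg h1, hc]
        rw [hstep, ih _ _ k hk]
        rw [PySem.Dict.get?_insert]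
        rw [if_neg (by intro hcontra; rw [hcontra] at hk; exact h1 hk)]

-- the ports, re-expressed through the proof-side loop bodies (definitional)
theorem pvA_eq (file_path : String) (ri : List (String × List (String × String))) :
    resolve_route_ref_for_file file_path ri =
      (match List.foldl (pvStepA (pvDropDotSlash (PySem.Chars.strip file_path.toList))) none
          ((PySem.Dict.mk ri).getD "path_to_route_id" []) with
      | some b => some b.2
      | none => none) := by
  unfold resolve_route_ref_for_file normalize_graph_node_id pvStepA
  rw [String.toList_ofList]

theorem pvB_eq (file_path : String) (ri : List (String × List (String × String))) :
    resolve_route_ref_for_file_alt file_path ri =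
      (match (pvCands (pvDropDotSlash (PySem.Chars.strip file_path.toList))).find?
          (fun c => (List.foldl pvStepB (PySem.Dict.empty, none)
            ((PySem.Dict.mk ri).getD "path_to_route_id" [])).1.contains c) with
      | some c => (List.foldl pvStepB (PySem.Dict.empty, none)
          ((PySem.Dict.mk ri).getD "path_to_route_id" [])).1.get? c
      | none => (List.foldl pvStepB (PySem.Dict.empty, none)
          ((PySem.Dict.mk ri).getD "path_to_route_id" [])).2) := rfl

-- ===== VERDICT (by name: the statement is the Claim_ definition above) =====
theorem resolve_route_ref_for_file_spec : Claim_equal_resolve_route_ref_for_file := by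
  intro file_path ri _
  unfold Spec_resolve_route_ref_for_file
  rw [pvA_eq, pvB_eq]
  set fp := pvDropDotSlash (PySem.Chars.strip file_path.toList) with hfp
  set pm := (PySem.Dict.mk ri).getD "path_to_route_id" [] with hpm
  rw [pvA_none]
  set st := List.foldl pvStepB (PySem.Dict.empty, none) pm with hst
  have hget : ∀ k : List Char, ¬ (k = [] ∨ k = ['.']) →
      st.1.get? k = (pm.find? (fun pr => pvRp pr == k)).map (fun pr => pr.2) := by
    intro k hk
    rw [hst, pvB_get pm _ _ k hk, PySem.Dict.get?_empty, Option.none_or]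
  have hgetfb : ∀ k : List Char, (k = [] ∨ k = ['.']) → st.1.contains k = false := by
    intro k hk
    rw [PySem.Dict.contains_eq_isSome_get?, hst, pvB_get_fb pm _ _ k hk, PySem.Dict.get?_empty]
    rfl
  have hsnd : st.2 = (pm.find? pvIsFb).map (fun pr => pr.2) := by
    rw [hst, pvB_snd, Option.none_or]
  have hcontains : ∀ k : List Char, ¬ (k = [] ∨ k = ['.']) →
      (st.1.contains k = true ↔ ∃ pr ∈ pm, pvRp pr = k) := by
    intro k hk
    rw [PySem.Dict.contains_eq_isSome_get?, hget k hk, Option.isSome_map, List.find?_isSome]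
    simp
  rcases hT : pvAmax fp pm with _ | m
  · have hnoM : ∀ pr ∈ pm, pvIsM fp pr = false := by
      have h0 := List.max?_eq_none_iff.mp hT
      have hfil : pm.filter (pvIsM fp) = [] := List.map_eq_nil_iff.mp h0
      intro pr hpr
      cases hM : pvIsM fp pr with
      | false => rfl
      | true =>
        have hmem : pr ∈ pm.filter (pvIsM fp) := List.mem_filter.mpr ⟨hpr, hM⟩
        rw [hfil] at hmem
        cases hmem
    have hfind : (pvCands fp).find? (fun c => st.1.contains c) = none := by
      rw [List.find?_eq_none]
      intro c hc
      by_cases hck : c = [] ∨ c = ['.']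
      · simp [hgetfb c hck]
      · intro hcontr
        obtain ⟨pr, hpr, hrp⟩ := (hcontains c hck).mp hcontr
        have hmatch := (pvMem_cands fp c hck).mp hc
        have hM : pvIsM fp pr = true := pvIsM_of fp c pr hrp hck hmatch
        rw [hnoM pr hpr] at hM
        cases hM
    simp only [Option.elim_none]
    rw [hfind, hsnd]
    cases pm.find? pvIsFb <;> rfl
  · have hmem := List.max?_mem hT
    obtain ⟨pr1, hpr1f, hpr1m⟩ := List.mem_map.mp hmem
    have hpr1 := List.mem_filter.mp hpr1f
    have hfindA : ∃ pr0, pm.find? (fun pr => pvIsM fp pr && (PySem.Chars.len (pvRp pr) == m)) = some pr0 := by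
      apply Option.isSome_iff_exists.mp
      rw [List.find?_isSome]
      exact ⟨pr1, hpr1.1, by rw [hpr1.2, hpr1m]; simp⟩
    obtain ⟨pr0, hfA⟩ := hfindA
    have hpr0mem := List.mem_of_find?_eq_some hfA
    have hpr0p := List.find?_some hfA
    rw [Bool.and_eq_true] at hpr0p
    have hM0 : pvIsM fp pr0 = true := hpr0p.1
    have hlen0 : PySem.Chars.len (pvRp pr0) = m := eq_of_beq hpr0p.2
    have hfb0 : ¬ (pvRp pr0 = [] ∨ pvRp pr0 = ['.']) := by
      intro hcontra
      simp [pvIsM, pvIsFb, hcontra] at hM0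
    have hmatch0 : fp = pvRp pr0 ∨ PySem.Chars.startswith fp (pvRp pr0 ++ ['/']) = true := by
      have hM0' := hM0
      rw [pvIsM, Bool.and_eq_true] at hM0'
      exact of_decide_eq_true hM0'.2
    have hc0 : pvRp pr0 ∈ pvCands fp := (pvMem_cands fp (pvRp pr0) hfb0).mpr hmatch0
    have hP0 : st.1.contains (pvRp pr0) = true := (hcontains (pvRp pr0) hfb0).mpr ⟨pr0, hpr0mem, rfl⟩
    have hbound : ∀ c ∈ pvCands fp, st.1.contains c = true → c.length ≤ (pvRp pr0).length := by
      intro c hc hcc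
      by_cases hck : c = [] ∨ c = ['.']
      · rw [hgetfb c hck] at hcc; cases hcc
      · obtain ⟨pr, hpr, hrp⟩ := (hcontains c hck).mp hcc
        have hmatchc := (pvMem_cands fp c hck).mp hc
        have hMc : pvIsM fp pr = true := pvIsM_of fp c pr hrp hck hmatchc
        have hle : PySem.Chars.len (pvRp pr) ≤ m := by
          have hmm := (List.max?_le_iff hT).mp (le_refl m)
          exact hmm _ (List.mem_map.mpr ⟨pr, List.mem_filter.mpr ⟨hpr, hMc⟩, rfl⟩)
        rw [hrp, pvLen_eq] at hle
        rw [pvLen_eq] at hlen0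
        omega
    have hfB : (pvCands fp).find? (fun c => st.1.contains c) = some (pvRp pr0) :=
      pvFind_decreasing _ (pvCands fp) (pvRp pr0) (pvCands_sorted fp) hc0 hP0 hbound
    have hcongr : pm.find? (fun pr => pvRp pr == pvRp pr0) =
        pm.find? (fun pr => pvIsM fp pr && (PySem.Chars.len (pvRp pr) == m)) := by
      apply pvFind_congr
      intro pr _
      by_cases he : pvRp pr = pvRp pr0
      · have hMc : pvIsM fp pr = true := pvIsM_of fp (pvRp pr0) pr he hfb0 hmatch0
        rw [beq_iff_eq.mpr he, hMc, he, hlen0]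
        simp
      · rw [beq_eq_false_iff_ne.mpr he]
        by_cases hMc : pvIsM fp pr = true
        · by_cases hlc : PySem.Chars.len (pvRp pr) = m
          · exfalso
            apply he
            have hmatchp : fp = pvRp pr ∨ PySem.Chars.startswith fp (pvRp pr ++ ['/']) = true := by
              have hMc' := hMc
              rw [pvIsM, Bool.and_eq_true] at hMc'
              exact of_decide_eq_true hMc'.2
            have h1 := pvMatch_take fp (pvRp pr) hmatchp
            have h2 := pvMatch_take fp (pvRp pr0) hmatch0
            have hll : (pvRp pr).length = (pvRp pr0).length := by
              rw [pvLen_eq] at hlc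
              rw [pvLen_eq] at hlen0
              omega
            rw [h1.1, h2.1, hll]
          · rw [hMc, beq_eq_false_iff_ne.mpr hlc]
            rfl
        · rw [Bool.eq_false_iff.mpr hMc]
          rfl
    simp only [Option.elim_some]
    rw [hfA, Option.map_some, hfB]
    show some ((m, pr0.2)).2 = st.1.get? (pvRp pr0)
    rw [hget (pvRp pr0) hfb0, hcongr, hfA]
    rfl
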